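-- pv_equiv track=rewrite | github.com/SickTheDuck1411/IT001-Python | DeDaiHoc/Smallestnumber.py | FindSmallestNumberandAppearance
-- ===== SOURCE A (Python) =====
-- def FindSmallestNumberandAppearance(array):
--     count = 0
--     smallest = array[0]
--     for i in range(1, len(array)):
--         if smallest > array[i]:
--             smallest = array[i]
--
--     for i in range(0,len(array)):
--         if smallest== array[i]:
--             count+=1
--     return (smallest, count)
-- ===== SOURCE B (Python) =====
-- def FindSmallestNumberandAppearance(array):
--     smallest = array[0]
--     count = 1
--     for v in array[1:]:
--         if v < smallest:
--             smallest = v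
--             count = 1
--         elif v == smallest:
--             count += 1
--     return (smallest, count)
-- ===== Notes on version B (the rewrite author's own statement) =====
-- stated objective: simpler
-- what changed: B computes the minimum and its occurrence count in a single pass (resetting the count on each new minimum) instead of A's two separate scans.
import Mathlib
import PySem

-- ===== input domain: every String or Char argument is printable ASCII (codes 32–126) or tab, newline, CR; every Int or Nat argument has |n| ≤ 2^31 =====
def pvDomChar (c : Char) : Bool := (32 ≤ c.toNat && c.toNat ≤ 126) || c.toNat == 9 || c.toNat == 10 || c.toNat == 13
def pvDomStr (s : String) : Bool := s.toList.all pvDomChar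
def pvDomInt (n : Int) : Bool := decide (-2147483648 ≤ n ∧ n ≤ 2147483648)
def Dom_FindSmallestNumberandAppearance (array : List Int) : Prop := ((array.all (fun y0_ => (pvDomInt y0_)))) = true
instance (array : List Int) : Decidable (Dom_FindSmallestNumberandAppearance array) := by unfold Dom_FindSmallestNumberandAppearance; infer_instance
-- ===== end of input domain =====

-- B: single pass maintaining (minimum, count) instead of A's two scans; same return value on every nonempty list.

-- ===== PORT A =====
-- literal port of A: smallest = array[0]; first loop finds the minimum over range(1,len),
-- second loop counts its occurrences over range(0,len).  Indices produced by range are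
-- always in bounds, so pyGetD with default 0 is exact; array[0] on [] raises (excluded by Pre_).
def FindSmallestNumberandAppearance (array : List Int) : Int × Int :=
  let smallest0 := PySem.List.pyGetD array 0 0
  let smallest := (PySem.List.pyRange 1 (PySem.List.len array) 1).foldl
    (fun s i => if s > PySem.List.pyGetD array i 0 then PySem.List.pyGetD array i 0 else s) smallest0
  let count := (PySem.List.pyRange 0 (PySem.List.len array) 1).foldl
    (fun c i => if smallest = PySem.List.pyGetD array i 0 then c + 1 else c) (0 : Int)
  (smallest, count)

-- ===== PORT B =====
-- literal port of B: one fold over the tail carrying the pair (smallest, count).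
def FindSmallestNumberandAppearance_alt (array : List Int) : Int × Int :=
  match array with
  | [] => (0, 0)   -- array[0] raises IndexError; excluded by Pre_
  | a :: rest =>
    rest.foldl (fun (p : Int × Int) v =>
      if v < p.1 then (v, 1) else if v = p.1 then (p.1, p.2 + 1) else p) (a, 1)

-- ===== PRECONDITION & SPEC =====
-- A (and B) raise IndexError on the empty list (array[0]); Pre_ excludes exactly that input.
def Pre_FindSmallestNumberandAppearance (array : List Int) : Prop := array ≠ []
instance (array : List Int) : Decidable (Pre_FindSmallestNumberandAppearance array) := by unfold Pre_FindSmallestNumberandAppearance; infer_instance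
def pvWitness_FindSmallestNumberandAppearance : List Int := [3, 0, 1, 0, 2]
def Spec_FindSmallestNumberandAppearance (array : List Int) (out : Int × Int) : Prop := out = FindSmallestNumberandAppearance_alt array
instance (array : List Int) (out : Int × Int) : Decidable (Spec_FindSmallestNumberandAppearance array out) := by unfold Spec_FindSmallestNumberandAppearance; infer_instance

-- ===== CLAIM (what is proved, stated in full; the proofs are below) =====
def Claim_equal_FindSmallestNumberandAppearance : Prop := ∀ (array : List Int), Dom_FindSmallestNumberandAppearance array → Pre_FindSmallestNumberandAppearance array → Spec_FindSmallestNumberandAppearance array (FindSmallestNumberandAppearance array)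

-- ===== LEMMAS AND PROOFS =====

-- A's running minimum and A's occurrence counter, as plain folds.
def pvMinF (a : Int) (l : List Int) : Int := l.foldl (fun s v => if s > v then v else s) a
def pvOccF (m : Int) (l : List Int) : Int := l.foldl (fun c v => if m = v then c + 1 else c) 0

lemma pvMinF_le (l : List Int) : ∀ a : Int, pvMinF a l ≤ a := by
  induction l with
  | nil => intro a; simp [pvMinF]
  | cons v t ih =>
    intro a
    have h := ih (if a > v then v else a)
    simp only [pvMinF, List.foldl_cons] at h ⊢
    split_ifs at h ⊢ with hv <;> omega

lemma pvOccF_shift (l : List Int) (m : Int) : ∀ c : Int,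
    l.foldl (fun c v => if m = v then c + 1 else c) c = c + pvOccF m l := by
  induction l with
  | nil => intro c; simp [pvOccF]
  | cons v t ih =>
    intro c
    simp only [pvOccF, List.foldl_cons] at ih ⊢
    rw [ih, ih (if m = v then (0:Int) + 1 else 0)]
    split_ifs <;> ring

-- Invariant of B's single pass: the pair carried is the running minimum together with
-- its occurrence count (the seed's count k survives iff the seed stays minimal).
lemma pvB_invariant (l : List Int) : ∀ (a k : Int),
    l.foldl (fun (p : Int × Int) v =>
      if v < p.1 then (v, 1) else if v = p.1 then (p.1, p.2 + 1) else p) (a, k)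
    = (pvMinF a l, pvOccF (pvMinF a l) l + if pvMinF a l = a then k else 0) := by
  induction l with
  | nil => intro a k; simp [pvMinF, pvOccF]
  | cons v t ih =>
    intro a k
    simp only [List.foldl_cons]
    by_cases h1 : v < a
    · rw [if_pos h1, ih v 1]
      have hmin : pvMinF a (v :: t) = pvMinF v t := by
        simp [pvMinF, List.foldl_cons, if_pos (by omega : a > v)]
      have hle : pvMinF v t ≤ v := pvMinF_le t v
      have hne : pvMinF v t ≠ a := by omega
      rw [hmin]
      have hocc : pvOccF (pvMinF v t) (v :: t)
          = (if pvMinF v t = v then (0:Int) + 1 else 0) + pvOccF (pvMinF v t) t := by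
        simp only [pvOccF, List.foldl_cons]
        exact pvOccF_shift t _ _
      rw [hocc, if_neg hne]
      refine Prod.ext rfl ?_
      simp only
      split_ifs <;> omega
    · rw [if_neg h1]
      by_cases h2 : v = a
      · rw [if_pos h2, ih a (k + 1)]
        have hmin : pvMinF a (v :: t) = pvMinF a t := by
          simp [pvMinF, List.foldl_cons, if_neg (by omega : ¬ a > v)]
        rw [hmin]
        have hocc : pvOccF (pvMinF a t) (v :: t)
            = (if pvMinF a t = v then (0:Int) + 1 else 0) + pvOccF (pvMinF a t) t := by
          simp only [pvOccF, List.foldl_cons]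
          exact pvOccF_shift t _ _
        rw [hocc]
        subst h2
        refine Prod.ext rfl ?_
        simp only
        split_ifs <;> omega
      · rw [if_neg h2, ih a k]
        have hmin : pvMinF a (v :: t) = pvMinF a t := by
          simp [pvMinF, List.foldl_cons, if_neg (by omega : ¬ a > v)]
        have hle : pvMinF a t ≤ a := pvMinF_le t a
        have hnev : pvMinF a t ≠ v := by omega
        rw [hmin]
        have hocc : pvOccF (pvMinF a t) (v :: t)
            = (if pvMinF a t = v then (0:Int) + 1 else 0) + pvOccF (pvMinF a t) t := by
          simp only [pvOccF, List.foldl_cons]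
          exact pvOccF_shift t _ _
        rw [hocc, if_neg hnev]
        refine Prod.ext rfl ?_
        simp only
        omega

-- A's two index loops collapse to folds over the list itself.
lemma pvA_eq (a : Int) (rest : List Int) :
    FindSmallestNumberandAppearance (a :: rest)
    = (pvMinF a rest, pvOccF (pvMinF a rest) (a :: rest)) := by
  have h0 : PySem.List.pyGetD (a :: rest) 0 0 = a := by
    simp [PySem.List.pyGetD, PySem.List.pyGet?, PySem.List.pyIdx?]
  have hlen : PySem.List.len (a :: rest) = ((a :: rest).length : Int) := by
    simp [PySem.List.len]
  have hmin : ∀ init : Int,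
      (PySem.List.pyRange 1 (((a :: rest).length : Int)) 1).foldl
        (fun s i => if s > PySem.List.pyGetD (a :: rest) i 0 then PySem.List.pyGetD (a :: rest) i 0 else s) init
      = pvMinF init rest := by
    intro init
    rw [PySem.List.foldl_pyRange_pyGetD' (a :: rest) 0
        (fun s v => if s > v then v else s) init (a := 1) (by norm_num)]
    rfl
  have hcnt : ∀ m : Int,
      (PySem.List.pyRange 0 (((a :: rest).length : Int)) 1).foldl
        (fun c i => if m = PySem.List.pyGetD (a :: rest) i 0 then c + 1 else c) (0 : Int)
      = pvOccF m (a :: rest) := by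
    intro m
    rw [PySem.List.foldl_pyRange_pyGetD' (a :: rest) 0
        (fun c v => if m = v then c + 1 else c) 0 (a := 0) (by norm_num)]
    rfl
  unfold FindSmallestNumberandAppearance
  simp only [h0, hlen, hmin, hcnt]

-- ===== VERDICT (by name: the statement is the Claim_ definition above) =====
theorem FindSmallestNumberandAppearance_spec : Claim_equal_FindSmallestNumberandAppearance := by
  intro array _ hpre
  match array with
  | [] => exact absurd rfl hpre
  | a :: rest =>
    show FindSmallestNumberandAppearance (a :: rest) = FindSmallestNumberandAppearance_alt (a :: rest)
    rw [pvA_eq]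
    show _ = rest.foldl _ (a, 1)
    rw [pvB_invariant rest a 1]
    have hocc : pvOccF (pvMinF a rest) (a :: rest)
        = (if pvMinF a rest = a then (0:Int) + 1 else 0) + pvOccF (pvMinF a rest) rest := by
      simp only [pvOccF, List.foldl_cons]
      exact pvOccF_shift rest _ _
    rw [hocc]
    refine Prod.ext rfl ?_
    simp only
    split_ifs <;> omega
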